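-- pv_equiv track=rewrite | github.com/Tiffany0410/Compiler_Optimization | examples/local_opt/lvn.py | last_writes
-- ===== SOURCE A (Python) =====
-- def last_writes(instrs):
--     out = [False] * len(instrs)
--     seen = set()
--     for idx in range(len(instrs) - 1, -1, -1):
--         instr = instrs[idx]
--         if 'dest' in instr:
--             dest = instr['dest']
--             if dest not in seen:
--                 out[idx] = True
--                 seen.add(dest)
--     return out
-- ===== SOURCE B (Python) =====
-- def last_writes(instrs):
--     last = {}
--     for i, instr in enumerate(instrs):
--         if 'dest' in instr:
--             last[instr['dest']] = i
--     out = [False] * len(instrs)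
--     for i in last.values():
--         out[i] = True
--     return out
-- ===== Notes on version B (the rewrite author's own statement) =====
-- stated objective: alternative
-- what changed: Replaces the single reverse scan with a first-seen set by a forward pass that builds a dest->index dict (later writes overwrite earlier ones) followed by a separate marking pass over the dict's values.
import Mathlib
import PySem

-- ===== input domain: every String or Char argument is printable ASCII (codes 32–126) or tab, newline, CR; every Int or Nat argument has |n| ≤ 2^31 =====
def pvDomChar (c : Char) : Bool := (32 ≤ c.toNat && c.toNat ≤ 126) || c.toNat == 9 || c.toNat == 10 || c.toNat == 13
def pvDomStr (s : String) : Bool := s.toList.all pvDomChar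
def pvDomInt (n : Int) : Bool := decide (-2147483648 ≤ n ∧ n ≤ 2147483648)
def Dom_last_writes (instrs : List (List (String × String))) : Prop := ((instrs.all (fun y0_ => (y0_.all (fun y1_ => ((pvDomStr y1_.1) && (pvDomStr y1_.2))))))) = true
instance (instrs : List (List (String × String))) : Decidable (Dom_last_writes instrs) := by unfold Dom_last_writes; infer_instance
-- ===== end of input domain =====

-- B replaces A's single reverse first-seen scan by a forward dest->index dict pass plus a separate marking pass (alternative decomposition, same cost).


-- ===== PORT A =====
-- loop body of A's reverse scan
def stepA (instrs : List (List (String × String))) (st : List Bool × PySem.Set String) (idx : Int) : List Bool × PySem.Set String :=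
  match List.lookup "dest" (PySem.List.pyGetD instrs idx []) with
  | some dest =>
      if PySem.Set.contains st.2 dest then st
      else (PySem.List.pySetD st.1 idx true, PySem.Set.add st.2 dest)
  | none => st

def last_writes (instrs : List (List (String × String))) : List Bool :=
  ((PySem.List.pyRange ((instrs.length : Int) - 1) (-1) (-1)).foldl (stepA instrs)
    (List.replicate instrs.length false, PySem.Set.empty)).1

-- ===== PORT B =====
-- loop body of B's forward dict-building pass
def stepB (d : PySem.Dict String Int) (p : Int × List (String × String)) : PySem.Dict String Int :=
  match List.lookup "dest" p.2 with
  | some dest => d.insert dest p.1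
  | none => d

def last_writes_alt (instrs : List (List (String × String))) : List Bool :=
  let last := (PySem.List.enumerate instrs 0).foldl stepB PySem.Dict.empty
  (PySem.Dict.values last).foldl (fun out i => PySem.List.pySetD out i true)
    (List.replicate instrs.length false)

-- ===== PRECONDITION & SPEC =====
def Spec_last_writes (instrs : List (List (String × String))) (out : List Bool) : Prop := out = last_writes_alt instrs
instance (instrs : List (List (String × String))) (out : List Bool) : Decidable (Spec_last_writes instrs out) := by unfold Spec_last_writes; infer_instance

-- ===== CLAIM (what is proved, stated in full; the proofs are below) =====
def Claim_equal_last_writes : Prop := ∀ (instrs : List (List (String × String))), Dom_last_writes instrs → Spec_last_writes instrs (last_writes instrs)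

-- ===== LEMMAS AND PROOFS =====

def ldi : List (List (String × String)) → String → Option Nat
  | [], _ => none
  | x :: rest, key =>
    match ldi rest key with
    | some j => some (j + 1)
    | none => if List.lookup "dest" x == some key then some 0 else none

theorem ldi_eq_none_iff (l : List (List (String × String))) (key : String) :
    ldi l key = none ↔ ∀ x ∈ l, List.lookup "dest" x ≠ some key := by
  induction l with
  | nil => simp [ldi]
  | cons x rest ih =>
    simp only [ldi]
    cases h : ldi rest key with
    | some j =>
      constructor
      · intro hc; exact absurd hc (by simp)
      · intro hall
        have : ldi rest key = none := ih.mpr (fun y hy => hall y (List.mem_cons_of_mem _ hy))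
        rw [this] at h; exact absurd h (by simp)
    | none =>
      rw [ih] at h
      constructor
      · intro hc x' hx'
        rcases List.mem_cons.mp hx' with rfl | hm
        · intro he; simp [he] at hc
        · exact h x' hm
      · intro hall
        have := hall x (List.mem_cons_self)
        simp [this]

theorem ldi_some_iff (l : List (List (String × String))) (key : String) :
    ∀ k : Nat, ldi l key = some k ↔
      ((∃ ins, l[k]? = some ins ∧ List.lookup "dest" ins = some key) ∧
       ∀ x ∈ l.drop (k + 1), List.lookup "dest" x ≠ some key) := by
  induction l with
  | nil => intro k; simp [ldi]
  | cons x rest ih =>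
    intro k
    cases k with
    | zero =>
      simp only [ldi]
      cases h : ldi rest key with
      | some j =>
        simp only [List.getElem?_cons_zero, List.drop_succ_cons, List.drop_zero]
        constructor
        · intro hc; exact absurd hc (by simp)
        · rintro ⟨⟨ins, hins, hl⟩, hall⟩
          have : ldi rest key = none := (ldi_eq_none_iff rest key).mpr hall
          rw [this] at h; exact absurd h (by simp)
      | none =>
        rw [ldi_eq_none_iff] at h
        simp only [List.getElem?_cons_zero, List.drop_succ_cons, List.drop_zero]
        constructor
        · intro hc
          split at hc
          · next heq =>
            refine ⟨⟨x, rfl, by simpa using heq⟩, h⟩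
          · exact absurd hc (by simp)
        · rintro ⟨⟨ins, hins, hl⟩, hall⟩
          have : ins = x := by simpa using hins.symm
          subst this
          simp [hl]
    | succ k' =>
      simp only [ldi, List.getElem?_cons_succ, List.drop_succ_cons]
      cases h : ldi rest key with
      | some j =>
        have := (ih k').symm
        constructor
        · intro hc
          have hj : j = k' := by simpa using hc
          subst hj
          exact (ih j).mp h
        · intro hr
          have : ldi rest key = some k' := (ih k').mpr hr
          rw [this] at h
          simp_all
      | none =>
        constructor
        · intro hc; split at hc <;> simp_all
        · intro hr
          have : ldi rest key = some k' := (ih k').mpr hr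
          rw [this] at h; exact absurd h (by simp)

theorem dictB_char (instrs : List (List (String × String))) :
    ∀ (s : Int) (d0 : PySem.Dict String Int) (key : String),
    ((PySem.List.enumerate instrs s).foldl stepB d0).get? key =
      match ldi instrs key with
      | some j => some (s + j)
      | none => d0.get? key := by
  induction instrs with
  | nil => intro s d0 key; simp [PySem.List.enumerate, ldi]
  | cons x rest ih =>
    intro s d0 key
    have hen : PySem.List.enumerate (x :: rest) s = (s, x) :: PySem.List.enumerate rest (s + 1) := by
      simp [PySem.List.enumerate]
    rw [hen]
    simp only [List.foldl_cons]
    rw [ih]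
    cases h : ldi rest key with
    | some j =>
      simp only [ldi, h]
      congr 1
      push_cast
      ring
    | none =>
      simp only [ldi, h]
      cases hx : List.lookup "dest" x with
      | some dest =>
        simp only [stepB, hx]
        rw [PySem.Dict.get?_insert]
        by_cases hk : key = dest
        · subst hk; simp
        · simp [hk, Ne.symm hk]
      | none => simp [stepB, hx]

theorem nodup_keys_foldl_stepB (l : List (Int × List (String × String))) :
    ∀ d : PySem.Dict String Int, d.keys.Nodup → (l.foldl stepB d).keys.Nodup := by
  induction l with
  | nil => intro d h; simpa
  | cons p rest ih =>
    intro d h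
    simp only [List.foldl_cons]
    apply ih
    unfold stepB
    cases List.lookup "dest" p.2 with
    | some dest => exact PySem.Dict.nodup_keys_insert _ _ _ h
    | none => exact h

theorem mem_values_iff {κ ν : Type} [BEq κ] [LawfulBEq κ] (d : PySem.Dict κ ν) (h : d.keys.Nodup) (v : ν) :
    v ∈ d.values ↔ ∃ k, d.get? k = some v := by
  simp only [PySem.Dict.values, List.mem_map]
  constructor
  · rintro ⟨⟨k, w⟩, hm, rfl⟩
    exact ⟨k, PySem.Dict.get?_of_mem_items _ hm h⟩
  · rintro ⟨k, hk⟩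
    exact ⟨(k, v), PySem.Dict.mem_items_of_get?_eq_some _ hk, rfl⟩

-- mark lemmas
theorem mark_length (ids : List Int) :
    ∀ start : List Bool,
    (ids.foldl (fun out i => PySem.List.pySetD out i true) start).length = start.length := by
  induction ids with
  | nil => intro start; rfl
  | cons i rest ih =>
    intro start
    simp only [List.foldl_cons]
    rw [ih, PySem.List.length_pySetD]

theorem mark_getD (ids : List Int) (h : ∀ i ∈ ids, 0 ≤ i) (k : Nat) :
    ∀ start : List Bool,
    ((ids.foldl (fun out i => PySem.List.pySetD out i true) start).getD k false = true ↔
      ((k : Int) ∈ ids ∧ k < start.length) ∨ start.getD k false = true) := by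
  induction ids with
  | nil => intro start; simp
  | cons i rest ih =>
    intro start
    have h0 : (0:Int) ≤ i := h i (List.mem_cons_self)
    simp only [List.foldl_cons]
    rw [ih (fun j hj => h j (List.mem_cons_of_mem _ hj))]
    rw [PySem.List.pySetD_of_nonneg _ _ h0, List.length_set]
    have hset : (start.set i.toNat true).getD k false = true ↔
        (k = i.toNat ∧ k < start.length) ∨ start.getD k false = true := by
      rcases lt_or_ge k start.length with hk | hk
      · rw [List.getD_eq_getElem _ _ (by simpa using hk), List.getD_eq_getElem _ _ hk]
        rw [List.getElem_set]
        split
        · next he => subst he; exact iff_of_true rfl (Or.inl ⟨rfl, hk⟩)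
        · next hne =>
            constructor
            · exact fun hh => Or.inr hh
            · rintro (⟨rfl, _⟩ | hh)
              · exact absurd rfl hne
              · exact hh
      · rw [List.getD_eq_default _ _ (by simpa using hk), List.getD_eq_default _ _ hk]
        simp; omega
    rw [hset]
    constructor
    · rintro (⟨hm, hlt⟩ | (⟨rfl, hlt⟩ | hs))
      · exact Or.inl ⟨List.mem_cons_of_mem _ hm, hlt⟩
      · exact Or.inl ⟨by simp [Int.toNat_of_nonneg h0], hlt⟩
      · exact Or.inr hs
    · rintro (⟨hm, hlt⟩ | hs)
      · rcases List.mem_cons.mp hm with rfl | hm'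
        · exact Or.inr (Or.inl ⟨by omega, hlt⟩)
        · exact Or.inl ⟨hm', hlt⟩
      · exact Or.inr (Or.inr hs)

def MarkA (instrs : List (List (String × String))) (seen : List String) (m k : Nat) : Prop :=
  ∃ d ins, instrs[k]? = some ins ∧ List.lookup "dest" ins = some d ∧ d ∉ seen ∧
    ∀ x ∈ (instrs.take m).drop (k + 1), List.lookup "dest" x ≠ some d

theorem A_inv (instrs : List (List (String × String))) :
    ∀ (m : Nat), m ≤ instrs.length →
    ∀ (out : List Bool) (seen : PySem.Set String), out.length = instrs.length →
    ((PySem.List.pyRange ((m : Int) - 1) (-1) (-1)).foldl (stepA instrs) (out, seen)).1.length = instrs.length ∧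
    (∀ k : Nat,
      ((PySem.List.pyRange ((m : Int) - 1) (-1) (-1)).foldl (stepA instrs) (out, seen)).1.getD k false = true ↔
        ((k < m ∧ MarkA instrs seen m k) ∨ out.getD k false = true)) := by
  intro m
  induction m with
  | zero =>
    intro _ out seen hlen
    rw [PySem.List.pyRange_neg_one_eq_nil (by norm_num)]
    refine ⟨hlen, fun k => ?_⟩
    simp
  | succ m ih =>
    intro hm out seen hlen
    have hmn : m < instrs.length := by omega
    have hrange : PySem.List.pyRange (((m+1 : Nat) : Int) - 1) (-1) (-1)
        = (m : Int) :: PySem.List.pyRange ((m : Int) - 1) (-1) (-1) := by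
      push_cast
      rw [show ((m:Int) + 1 - 1) = (m:Int) by ring]
      exact PySem.List.pyRange_neg_one_cons (by omega)
    rw [hrange, List.foldl_cons]
    have hget : PySem.List.pyGetD instrs ((m : Int)) [] = instrs[m] :=
      PySem.List.pyGetD_ofNat instrs m [] hmn
    have htake : instrs.take (m+1) = instrs.take m ++ [instrs[m]] := by
      rw [List.take_succ]
      simp [List.getElem?_eq_getElem hmn]
    cases hx : List.lookup "dest" instrs[m] with
    | none =>
      have hstep : stepA instrs (out, seen) ((m : Int)) = (out, seen) := by
        simp [stepA, hget, hx]
      rw [hstep]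
      obtain ⟨hl, hch⟩ := ih (by omega) out seen hlen
      refine ⟨hl, fun k => ?_⟩
      rw [hch k]
      constructor
      · rintro (⟨hk, d, ins, hins, hld, hns, hall⟩ | ho)
        · refine Or.inl ⟨by omega, d, ins, hins, hld, hns, ?_⟩
          rw [htake]
          intro x hxm
          rcases List.mem_append.mp (by
            rw [List.drop_append_of_le_length (by simp; omega)] at hxm; exact hxm) with h1 | h2
          · exact hall x h1
          · have : x = instrs[m] := by simpa using h2
            subst this; simp [hx]
        · exact Or.inr ho
      · rintro (⟨hk, d, ins, hins, hld, hns, hall⟩ | ho)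
        · have hkm : k ≠ m := by
            intro rfl'
            subst rfl'
            rw [List.getElem?_eq_getElem hmn] at hins
            cases hins
            simp [hx] at hld
          refine Or.inl ⟨by omega, d, ins, hins, hld, hns, ?_⟩
          intro x hxm
          apply hall
          rw [htake, List.drop_append_of_le_length (by simp; omega)]
          exact List.mem_append_left _ hxm
        · exact Or.inr ho
    | some d =>
      by_cases hseen : d ∈ seen
      · have hstep : stepA instrs (out, seen) ((m : Int)) = (out, seen) := by
          have hc := (PySem.Set.contains_iff seen d).mpr hseen
          unfold stepA
          rw [hget, hx]
          simp [hc]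
          intro h
          exact absurd hseen h
        rw [hstep]
        obtain ⟨hl, hch⟩ := ih (by omega) out seen hlen
        refine ⟨hl, fun k => ?_⟩
        rw [hch k]
        constructor
        · rintro (⟨hk, d', ins, hins, hld, hns, hall⟩ | ho)
          · refine Or.inl ⟨by omega, d', ins, hins, hld, hns, ?_⟩
            rw [htake]
            intro x hxm
            rcases List.mem_append.mp (by
              rw [List.drop_append_of_le_length (by simp; omega)] at hxm; exact hxm) with h1 | h2
            · exact hall x h1
            · have : x = instrs[m] := by simpa using h2
              subst this
              rw [hx]
              intro he; cases he; exact hns hseen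
          · exact Or.inr ho
        · rintro (⟨hk, d', ins, hins, hld, hns, hall⟩ | ho)
          · have hkm : k ≠ m := by
              intro rfl'
              subst rfl'
              rw [List.getElem?_eq_getElem hmn] at hins
              cases hins
              rw [hx] at hld; cases hld
              exact hns hseen
            refine Or.inl ⟨by omega, d', ins, hins, hld, hns, ?_⟩
            intro x hxm
            apply hall
            rw [htake, List.drop_append_of_le_length (by simp; omega)]
            exact List.mem_append_left _ hxm
          · exact Or.inr ho
      · have hcon : seen.contains d = false := by
          rcases hc : seen.contains d with _ | _
          · rfl
          · exact absurd ((PySem.Set.contains_iff seen d).mp hc) hseen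
        have hstep : stepA instrs (out, seen) ((m : Int)) = (out.set m true, PySem.Set.add seen d) := by
          simp only [stepA, hget, hx, hcon, Bool.false_eq_true, if_neg]
          rw [PySem.List.pySetD_of_nonneg out true (by omega : (0:Int) ≤ (m:Int))]
          simp
        rw [hstep]
        obtain ⟨hl, hch⟩ := ih (by omega) (out.set m true) (PySem.Set.add seen d) (by simpa using hlen)
        refine ⟨hl, fun k => ?_⟩
        rw [hch k]
        have houtset : ∀ k : Nat, (out.set m true).getD k false = true ↔ (k = m ∨ out.getD k false = true) := by
          intro k
          rcases lt_or_ge k out.length with hk | hk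
          · rw [List.getD_eq_getElem _ _ (by simpa using hk), List.getD_eq_getElem _ _ hk]
            rw [List.getElem_set]
            split
            · next he => exact iff_of_true rfl (Or.inl he.symm)
            · next hne =>
              constructor
              · exact fun hh => Or.inr hh
              · rintro (rfl | hh)
                · exact absurd rfl hne
                · exact hh
          · rw [List.getD_eq_default _ _ (by simpa using hk), List.getD_eq_default _ _ hk]
            simp; omega
        rw [houtset k]
        constructor
        · rintro (⟨hk, d', ins, hins, hld, hns, hall⟩ | (hkm | ho))
          · rw [PySem.Set.mem_add] at hns
            push_neg at hns
            refine Or.inl ⟨by omega, d', ins, hins, hld, hns.1, ?_⟩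
            rw [htake]
            intro x hxm
            rcases List.mem_append.mp (by
              rw [List.drop_append_of_le_length (by simp; omega)] at hxm; exact hxm) with h1 | h2
            · exact hall x h1
            · have : x = instrs[m] := by simpa using h2
              subst this
              rw [hx]
              intro he; cases he; exact hns.2 rfl
          · refine Or.inl ⟨by omega, d, instrs[m], by rw [hkm]; exact List.getElem?_eq_getElem hmn, hx, hseen, ?_⟩
            intro x hxm
            rw [htake, List.drop_eq_nil_of_le (by simp; omega)] at hxm
            simp at hxm
          · exact Or.inr ho
        · rintro (⟨hk, d', ins, hins, hld, hns, hall⟩ | ho)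
          · by_cases hkm : k = m
            · subst hkm
              exact Or.inr (Or.inl rfl)
            · have hdd : d' ≠ d := by
                intro he
                exact hall instrs[m]
                  (by rw [htake, List.drop_append_of_le_length (by simp; omega)]
                      exact List.mem_append_right _ (by simp))
                  (hx.trans (congrArg some he.symm))
              refine Or.inl ⟨by omega, d', ins, hins, hld, ?_, ?_⟩
              · rw [PySem.Set.mem_add]
                push_neg
                exact ⟨hns, hdd⟩
              · intro x hxm
                apply hall
                rw [htake, List.drop_append_of_le_length (by simp; omega)]
                exact List.mem_append_left _ hxm
          · exact Or.inr (Or.inr ho)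

-- ===== final assembly =====

theorem a_char (instrs : List (List (String × String))) :
    (last_writes instrs).length = instrs.length ∧
    (∀ k : Nat, (last_writes instrs).getD k false = true ↔
      (k < instrs.length ∧ MarkA instrs [] instrs.length k)) := by
  obtain ⟨hl, hch⟩ := A_inv instrs instrs.length le_rfl
    (List.replicate instrs.length false) PySem.Set.empty (by simp)
  refine ⟨hl, fun k => ?_⟩
  unfold last_writes
  rw [hch k]
  simp [List.getD_replicate]

theorem b_values_char (instrs : List (List (String × String))) (i : Int) :
    i ∈ PySem.Dict.values ((PySem.List.enumerate instrs 0).foldl stepB PySem.Dict.empty) ↔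
      ∃ key, ldi instrs key = some i.toNat ∧ 0 ≤ i := by
  have hnd : ((PySem.List.enumerate instrs 0).foldl stepB PySem.Dict.empty).keys.Nodup :=
    nodup_keys_foldl_stepB _ _ (by simp)
  rw [mem_values_iff _ hnd]
  constructor
  · rintro ⟨key, hk⟩
    rw [dictB_char instrs 0 PySem.Dict.empty key] at hk
    cases h : ldi instrs key with
    | none => rw [h] at hk; simp [PySem.Dict.get?_empty] at hk
    | some j =>
      rw [h] at hk
      simp only [Option.some.injEq] at hk
      refine ⟨key, ?_, by omega⟩
      rw [h]
      congr 1
      omega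
  · rintro ⟨key, hk, hnn⟩
    refine ⟨key, ?_⟩
    rw [dictB_char instrs 0 PySem.Dict.empty key, hk]
    simp
    omega

theorem b_char (instrs : List (List (String × String))) :
    (last_writes_alt instrs).length = instrs.length ∧
    (∀ k : Nat, (last_writes_alt instrs).getD k false = true ↔
      (k < instrs.length ∧ MarkA instrs [] instrs.length k)) := by
  unfold last_writes_alt
  set vals := PySem.Dict.values ((PySem.List.enumerate instrs 0).foldl stepB PySem.Dict.empty) with hvals
  have hnn : ∀ i ∈ vals, (0:Int) ≤ i := by
    intro i hi
    exact ((b_values_char instrs i).mp hi).choose_spec.2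
  refine ⟨by rw [mark_length]; simp, fun k => ?_⟩
  rw [mark_getD vals hnn k (List.replicate instrs.length false)]
  rw [List.length_replicate]
  have hrep : (List.replicate instrs.length false).getD k false = false := by
    rcases lt_or_ge k instrs.length with h | h
    · rw [List.getD_eq_getElem _ _ (by simpa using h)]
      simp
    · rw [List.getD_eq_default _ _ (by simpa using h)]
  rw [hrep]
  simp only [Bool.false_eq_true, or_false]
  rw [b_values_char instrs (k : Int)]
  constructor
  · rintro ⟨⟨key, hldi, _⟩, hk⟩
    simp only [Int.toNat_natCast] at hldi
    obtain ⟨⟨ins, hins, hlk⟩, hall⟩ := (ldi_some_iff instrs key k).mp hldi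
    refine ⟨hk, key, ins, hins, hlk, by simp, ?_⟩
    rw [List.take_length]
    exact hall
  · rintro ⟨hk, d, ins, hins, hlk, _, hall⟩
    rw [List.take_length] at hall
    refine ⟨⟨d, ?_, by omega⟩, hk⟩
    simp only [Int.toNat_natCast]
    exact (ldi_some_iff instrs d k).mpr ⟨⟨ins, hins, hlk⟩, hall⟩

-- ===== VERDICT (by name: the statement is the Claim_ definition above) =====
theorem last_writes_spec : Claim_equal_last_writes := by
  intro instrs _
  unfold Spec_last_writes
  obtain ⟨hal, hac⟩ := a_char instrs
  obtain ⟨hbl, hbc⟩ := b_char instrs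
  apply List.ext_getElem (by rw [hal, hbl])
  intro k hk1 hk2
  have h1 : (last_writes instrs)[k] = (last_writes instrs).getD k false :=
    (List.getD_eq_getElem _ _ hk1).symm
  have h2 : (last_writes_alt instrs)[k] = (last_writes_alt instrs).getD k false :=
    (List.getD_eq_getElem _ _ hk2).symm
  rw [h1, h2]
  have := (hac k).trans (hbc k).symm
  cases hb : (last_writes_alt instrs).getD k false
  · cases ha : (last_writes instrs).getD k false
    · rfl
    · rw [ha] at this; rw [hb] at this
      exact absurd (this.mp rfl) (by simp)
  · exact this.mpr hb
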